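-- pv_equiv track=rewrite | github.com/ChinmayK0607/heiretsu | pipeline.py | _partition_layers
-- ===== SOURCE A (Python) =====
-- from typing import List, Optional, Tuple
--
-- def _partition_layers(n_layer: int, pp: int) -> List[Tuple[int, int]]:
--     if pp <= 0:
--         raise ValueError("pp must be >= 1")
--     if pp > n_layer:
--         raise ValueError(f"pp {pp} > n_layer {n_layer} (would create empty stages)")
--     base = n_layer // pp
--     rem = n_layer % pp
--     sizes = [base + (1 if i < rem else 0) for i in range(pp)]
--     ranges = []
--     start = 0
--     for sz in sizes:
--         end = start + sz
--         ranges.append((start, end))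
--         start = end
--     return ranges
-- ===== SOURCE B (Python) =====
-- def _partition_layers(n_layer, pp):
--     if pp <= 0:
--         raise ValueError("pp must be >= 1")
--     if pp > n_layer:
--         raise ValueError(f"pp {pp} > n_layer {n_layer} (would create empty stages)")
--     base, rem = divmod(n_layer, pp)
--     def bnd(i):
--         return i * base + min(i, rem)
--     return [(bnd(i), bnd(i + 1)) for i in range(pp)]
-- ===== Notes on version B (the rewrite author's own statement) =====
-- stated objective: idiomatic
-- what changed: Replaces the sizes list and the running-start accumulator loop with a closed-form boundary formula i*base + min(i, rem), building each range directly from its index.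
import Mathlib
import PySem

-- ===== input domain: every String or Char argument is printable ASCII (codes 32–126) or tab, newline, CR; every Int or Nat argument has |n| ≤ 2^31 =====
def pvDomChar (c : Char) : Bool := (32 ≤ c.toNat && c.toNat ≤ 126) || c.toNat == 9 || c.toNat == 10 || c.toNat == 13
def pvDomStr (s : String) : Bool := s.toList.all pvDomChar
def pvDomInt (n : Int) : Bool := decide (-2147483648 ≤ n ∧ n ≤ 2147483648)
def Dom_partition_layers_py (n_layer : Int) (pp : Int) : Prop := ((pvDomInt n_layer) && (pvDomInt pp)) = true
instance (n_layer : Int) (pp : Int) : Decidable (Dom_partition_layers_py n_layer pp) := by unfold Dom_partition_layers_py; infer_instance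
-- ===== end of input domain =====

-- B replaces A's sizes list and running-start accumulator with the closed-form boundary
-- i*base + min(i, rem); same guards, same result (idiomatic, not faster).

-- ===== PORT A =====
-- literal port of A: base/rem, sizes list, then a fold carrying (ranges, start)
def partition_layers_py (n_layer : Int) (pp : Int) : List (Int × Int) :=
  let base := PySem.Int.floordiv n_layer pp
  let rem := PySem.Int.mod n_layer pp
  let sizes := (PySem.List.pyRange 0 pp 1).map (fun i => base + (if i < rem then (1:Int) else 0))
  let st := sizes.foldl
    (fun (st : List (Int × Int) × Int) sz =>
      let start := st.2
      let en := start + sz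
      (st.1 ++ [(start, en)], en)) ([], 0)
  st.1

-- ===== PORT B =====
-- port of Source B: boundary function bnd i = i*base + min i rem, ranges built by index
def partition_layers_py_alt (n_layer : Int) (pp : Int) : List (Int × Int) :=
  let base := PySem.Int.floordiv n_layer pp
  let rem := PySem.Int.mod n_layer pp
  let bnd := fun (i : Int) => i * base + min i rem
  (PySem.List.pyRange 0 pp 1).map (fun i => (bnd i, bnd (i + 1)))

-- ===== PRECONDITION & SPEC =====
-- A raises ValueError when pp <= 0 or pp > n_layer; exactly those inputs are excluded.
def Pre_partition_layers_py (n_layer : Int) (pp : Int) : Prop := 1 ≤ pp ∧ pp ≤ n_layer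
instance (n_layer : Int) (pp : Int) : Decidable (Pre_partition_layers_py n_layer pp) := by
  unfold Pre_partition_layers_py; infer_instance
def pvWitness_partition_layers_py : Int × Int := (7, 3)

def Spec_partition_layers_py (n_layer : Int) (pp : Int) (out : List (Int × Int)) : Prop :=
  out = partition_layers_py_alt n_layer pp
instance (n_layer : Int) (pp : Int) (out : List (Int × Int)) : Decidable (Spec_partition_layers_py n_layer pp out) := by
  unfold Spec_partition_layers_py; infer_instance

-- ===== CLAIM (what is proved, stated in full; the proofs are below) =====
def Claim_equal_partition_layers_py : Prop := ∀ (n_layer : Int) (pp : Int), Dom_partition_layers_py n_layer pp → Pre_partition_layers_py n_layer pp → Spec_partition_layers_py n_layer pp (partition_layers_py n_layer pp)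

-- ===== LEMMAS AND PROOFS =====

-- A's fold over the sizes of a contiguous index block [j, j+m) started at boundary j
-- appends exactly the boundary pairs of that block and ends at boundary j+m.
theorem pv_fold_loop (base rem : Int) :
    ∀ (m : Nat) (j : Int) (acc : List (Int × Int)),
      ((PySem.List.pyRange j (j + (m : Int)) 1).map
          (fun i => base + (if i < rem then (1:Int) else 0))).foldl
        (fun (st : List (Int × Int) × Int) sz =>
          let start := st.2
          let en := start + sz
          (st.1 ++ [(start, en)], en)) (acc, j * base + min j rem)
      = (acc ++ (PySem.List.pyRange j (j + (m : Int)) 1).map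
            (fun i => (i * base + min i rem, (i + 1) * base + min (i + 1) rem)),
         (j + (m : Int)) * base + min (j + (m : Int)) rem) := by
  intro m
  induction m with
  | zero =>
    intro j acc
    rw [PySem.List.pyRange_one_eq_nil (by omega)]
    simp
  | succ k ih =>
    intro j acc
    rw [PySem.List.pyRange_one_cons (by push_cast; omega)]
    have hstep : j * base + min j rem + (base + (if j < rem then (1:Int) else 0))
        = (j + 1) * base + min (j + 1) rem := by
      have hmin : min (j + 1) rem = min j rem + (if j < rem then (1:Int) else 0) := by
        split_ifs with h <;> omega
      rw [hmin]; ring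
    have hrng : j + ((k + 1 : Nat) : Int) = (j + 1) + (k : Int) := by push_cast; ring
    simp only [List.map_cons, List.foldl_cons, hstep, hrng]
    rw [ih (j + 1) (acc ++ [(j * base + min j rem, (j + 1) * base + min (j + 1) rem)])]
    simp

-- ===== VERDICT (by name: the statement is the Claim_ definition above) =====
theorem partition_layers_py_spec : Claim_equal_partition_layers_py := by
  intro n pp _ hpre
  unfold Spec_partition_layers_py partition_layers_py partition_layers_py_alt
  obtain ⟨h1, h2⟩ := hpre
  have hpp : 0 < pp := by omega
  have hrem : 0 ≤ PySem.Int.mod n pp := PySem.Int.mod_nonneg n hpp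
  set base := PySem.Int.floordiv n pp
  set rem := PySem.Int.mod n pp
  have h0 : (0 : Int) * base + min 0 rem = 0 := by
    have : min (0:Int) rem = 0 := by omega
    rw [this]; ring
  have := pv_fold_loop base rem pp.toNat 0 []
  rw [h0] at this
  simp only [zero_add, Int.toNat_of_nonneg (le_of_lt hpp)] at this
  simp [this]
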